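-- pv_equiv track=rewrite | github.com/istimaldar/SVM | wolf_method.py | generate_a
-- ===== SOURCE A (Python) =====
-- import typing
--
-- Matrix = typing.List[typing.List[float]]
--
-- def generate_a(n: int) -> Matrix:
--     """
--     This function generates a matrix A for the Wolf method
--     :param n: number of x variables
--     :return: matrix A for Wolf method
--     """
--     length = 2 * n
--     result = []
--     for i in range(length - 1):
--         equation = []
--         for j in range(length):
--             if i == 0:
--                 if j < n:
--                     equation.append(1)
--                 else:
--                     equation.append(0)
--             else:
--                 if j == i - 1:
--                     equation.append(-1)
--                 elif j == i + n - 1: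
--                     equation.append(1)
--                 else:
--                     equation.append(0)
--         result.append(equation)
--     return result
-- ===== SOURCE B (Python) =====
-- def generate_a(n: int):
--     """Column-wise construction: build each of the 2n sparse columns, then transpose with zip."""
--     length = 2 * n
--     height = length - 1
--     cols = []
--     for j in range(length):
--         col = [0] * height
--         if j < n:
--             col[0] = 1
--         if j + 1 < height:
--             col[j + 1] = -1
--         if 1 <= j - n + 1 < height:
--             col[j - n + 1] = 1
--         cols.append(col)
--     return [list(row) for row in zip(*cols)]
-- ===== Notes on version B (the rewrite author's own statement) =====
-- stated objective: alternative
-- what changed: B constructs the transpose: it builds each of the 2n sparse columns (zeros with up to three direct assignments) and then transposes with zip(*cols) to obtain the rows, instead of A's row-by-row per-cell branch cascade.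
import Mathlib
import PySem

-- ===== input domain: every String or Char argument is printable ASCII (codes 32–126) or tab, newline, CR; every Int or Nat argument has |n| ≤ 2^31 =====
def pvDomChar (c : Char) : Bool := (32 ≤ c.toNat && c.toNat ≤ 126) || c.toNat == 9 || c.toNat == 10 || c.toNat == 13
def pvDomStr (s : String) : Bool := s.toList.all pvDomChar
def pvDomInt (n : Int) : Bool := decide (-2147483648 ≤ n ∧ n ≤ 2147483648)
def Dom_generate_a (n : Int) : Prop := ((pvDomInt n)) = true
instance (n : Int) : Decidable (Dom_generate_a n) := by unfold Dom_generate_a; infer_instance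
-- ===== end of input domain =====

-- B builds the 2n sparse COLUMNS of the matrix and transposes them with zip(*cols) (objective: alternative).

-- ===== PORT A =====
def generate_a (n : Int) : List (List Int) :=
  let length := 2 * n
  (PySem.List.pyRange 0 (length - 1) 1).foldl (fun result i =>
    result ++ [(PySem.List.pyRange 0 length 1).foldl (fun equation j =>
      equation ++ [if i = 0 then (if j < n then (1 : Int) else 0)
                   else if j = i - 1 then -1
                   else if j = i + n - 1 then 1
                   else 0]) []]) []

-- ===== PORT B =====
-- loop body of Source B: one sparse column (zeros with up to three direct assignments)
def buildCol (n height j : Int) : List Int :=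
  let col := List.replicate height.toNat (0 : Int)
  let col := if j < n then col.set 0 1 else col
  let col := if j + 1 < height then col.set (j + 1).toNat (-1) else col
  if 1 ≤ j - n + 1 ∧ j - n + 1 < height then col.set (j - n + 1).toNat 1 else col

-- hand port of Python's zip(*cols) (PySem has binary List.zip only): exact — recursion on the
-- first column, stopping as soon as any column is exhausted, is Python's shortest-list truncation.
def zipStarAux : List Int → List (List Int) → List (List Int)
  | [], _ => []
  | x :: xs, rest =>
    if rest.any (fun c => c.isEmpty) then []
    else (x :: rest.map (fun c => c.headD 0)) :: zipStarAux xs (rest.map (fun c => c.tail))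

def zipStar : List (List Int) → List (List Int)
  | [] => []
  | c :: rest => zipStarAux c rest

def generate_a_alt (n : Int) : List (List Int) :=
  let length := 2 * n
  let height := length - 1
  let cols := (PySem.List.pyRange 0 length 1).foldl (fun cols j => cols ++ [buildCol n height j]) []
  zipStar cols

-- ===== PRECONDITION & SPEC =====
def Spec_generate_a (n : Int) (out : List (List Int)) : Prop := out = generate_a_alt n
instance (n : Int) (out : List (List Int)) : Decidable (Spec_generate_a n out) := by unfold Spec_generate_a; infer_instance

-- ===== CLAIM (what is proved, stated in full; the proofs are below) =====
def Claim_equal_generate_a : Prop := ∀ (n : Int), Dom_generate_a n → Spec_generate_a n (generate_a n)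

-- ===== LEMMAS AND PROOFS =====

theorem length_buildCol (n height j : Int) : (buildCol n height j).length = height.toNat := by
  unfold buildCol
  split_ifs <;> simp

-- zipStarAux on equal-length columns is the row-indexed transpose.
-- zipStarAux on equal-length columns is the row-indexed transpose.
theorem zipStarAux_eq (h : Nat) : ∀ (c : List Int) (rest : List (List Int)),
    c.length = h → (∀ d ∈ rest, d.length = h) →
    zipStarAux c rest
      = (List.range h).map (fun r => c.getD r 0 :: rest.map (fun d => d.getD r 0)) := by
  induction h with
  | zero =>
    intro c rest hc _
    rw [List.length_eq_zero_iff] at hc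
    subst hc
    simp [zipStarAux]
  | succ h ih =>
    intro c rest hc hrest
    obtain ⟨x, xs, rfl⟩ : ∃ x xs, c = x :: xs := by
      cases c with
      | nil => simp at hc
      | cons x xs => exact ⟨x, xs, rfl⟩
    have hne : rest.any (fun c => c.isEmpty) = false := by
      simp only [List.any_eq_false]
      intro d hd
      have h0 := hrest d hd
      cases d
      · simp at h0
      · simp
    rw [zipStarAux, if_neg (by simp [hne])]
    rw [ih xs (rest.map (fun c => c.tail)) (by simpa using hc)
      (by intro d hd; simp at hd; obtain ⟨e, he, rfl⟩ := hd; have := hrest e he; simp [this])]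
    rw [List.range_succ_eq_map, List.map_cons, List.map_map]
    congr 1
    · simp only [List.getD_cons_zero]
      congr 1
      apply List.map_congr_left
      intro d _
      cases d <;> simp
    · apply List.map_congr_left
      intro r _
      simp only [Function.comp, List.getD_cons_succ]
      congr 1
      rw [List.map_map]
      apply List.map_congr_left
      intro d _
      cases d <;> simp

theorem zipStar_eq (h : Nat) (cols : List (List Int)) (hne : cols ≠ [])
    (hlen : ∀ d ∈ cols, d.length = h) :
    zipStar cols = (List.range h).map (fun r => cols.map (fun d => d.getD r 0)) := by
  cases cols with
  | nil => exact absurd rfl hne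
  | cons c rest =>
    rw [zipStar, zipStarAux_eq h c rest (hlen c (by simp)) (fun d hd => hlen d (by simp [hd]))]
    simp

-- B's entry (buildCol n (2n-1) j).getD r equals A's cell formula at row r, column j.
theorem buildCol_getD (n j : Int) (r : Nat) (hn : 1 ≤ n) (hj : 0 ≤ j ∧ j < 2 * n)
    (hr : r < (2 * n - 1).toNat) :
    (buildCol n (2 * n - 1) j).getD r 0
      = (if (r : Int) = 0 then (if j < n then (1 : Int) else 0)
         else if j = (r : Int) - 1 then -1
         else if j = (r : Int) + n - 1 then 1
         else 0) := by
  unfold buildCol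
  split_ifs with h1 h2 h3 <;>
    simp only [List.getD_eq_getElem?_getD] <;>
    rw [List.getElem?_eq_getElem (by simp [List.length_set]; omega)] <;>
    simp only [List.getElem_set, List.getElem_replicate, Option.getD_some] <;>
    omega

-- ===== VERDICT (by name: the statement is the Claim_ definition above) =====
theorem generate_a_spec : Claim_equal_generate_a := by
  intro n _
  unfold Spec_generate_a generate_a generate_a_alt
  simp only [PySem.List.foldl_append_singleton_eq_map, List.nil_append]
  rcases lt_or_ge n 1 with hn | hn
  · rw [PySem.List.pyRange_one_eq_nil (show 2 * n - 1 ≤ 0 by omega),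
        PySem.List.pyRange_one_eq_nil (show 2 * n ≤ 0 by omega)]
    rfl
  · have hcols_ne : (PySem.List.pyRange 0 (2 * n) 1).map (buildCol n (2 * n - 1)) ≠ [] := by
      intro hcontra
      have := congrArg List.length hcontra
      simp [PySem.List.length_pyRange_one] at this
      omega
    rw [zipStar_eq (2 * n - 1).toNat _ hcols_ne
      (by intro d hd; simp at hd; obtain ⟨j, _, rfl⟩ := hd; exact length_buildCol n _ j)]
    apply List.ext_getElem
    · simp [PySem.List.length_pyRange_one]
    · intro r h1 h2
      simp only [List.length_map, PySem.List.length_pyRange_one] at h1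
      simp only [List.getElem_map, PySem.List.getElem_pyRange_one, List.getElem_range,
        List.map_map]
      apply List.ext_getElem
      · simp [PySem.List.length_pyRange_one]
      · intro k k1 k2
        simp only [List.length_map, PySem.List.length_pyRange_one] at k1
        simp only [List.getElem_map, PySem.List.getElem_pyRange_one, Function.comp]
        rw [buildCol_getD n (0 + (k : Int)) r hn (by omega) (by omega)]
        norm_num
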